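-- pv_equiv track=rewrite | github.com/AlexO28/leet_code_problems | queries_on_a_permutation_with_key.py | processQueries
-- ===== SOURCE A (Python) =====
-- from typing import List
--
-- def processQueries(queries: List[int], m: int) -> List[int]:
--     P = [i for i in range(1, m + 1)]
--     res = []
--     for query in queries:
--         for j in range(m):
--             if P[j] == query:
--                 res.append(j)
--                 del P[j]
--                 P.insert(0, query)
--                 break
--     return res
-- ===== SOURCE B (Python) =====
-- def processQueries(queries, m):
--     # Move-to-front simulated lazily: only touched elements are kept in `front`;
--     # an untouched value q sits at index (q-1) + #(front elements greater than q).
--     front = []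
--     res = []
--     for q in queries:
--         if q in front:
--             i = front.index(q)
--             res.append(i)
--             front.pop(i)
--             front.insert(0, q)
--         elif 1 <= q <= m:
--             res.append(q - 1 + sum(1 for x in front if x > q))
--             front.insert(0, q)
--     return res
-- ===== Notes on version B (the rewrite author's own statement) =====
-- stated objective: alternative
-- what changed: Instead of materialising the whole permutation [1..m] and scanning it for every query, B keeps only the move-to-front list of already-queried values and computes an untouched value's index by a closed form (q-1 plus the number of fronted values greater than q), so per-query cost depends on the number of queries, not on m.
import Mathlib
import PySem

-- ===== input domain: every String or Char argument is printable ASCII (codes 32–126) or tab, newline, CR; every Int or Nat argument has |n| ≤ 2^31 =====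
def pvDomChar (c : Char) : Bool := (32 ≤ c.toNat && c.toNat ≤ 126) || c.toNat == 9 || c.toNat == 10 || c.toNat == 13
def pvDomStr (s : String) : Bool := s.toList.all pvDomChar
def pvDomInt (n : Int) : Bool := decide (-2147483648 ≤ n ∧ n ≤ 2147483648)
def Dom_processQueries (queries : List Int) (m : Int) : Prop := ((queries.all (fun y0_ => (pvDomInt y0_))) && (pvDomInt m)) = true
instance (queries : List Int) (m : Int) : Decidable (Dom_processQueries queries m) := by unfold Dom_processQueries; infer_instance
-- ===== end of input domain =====

-- B replaces A's per-query scan of the full permutation [1..m] by a lazy move-to-front list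
-- of already-queried values plus a closed-form index for untouched values.

-- ===== PORT A =====
-- inner loop 'for j in range(m): if P[j] == query: … break' — returns the j it breaks at
-- (pyGet? none = IndexError is unreachable here since every j of range(m) is < len(P))
def pqFindA (P : List Int) (query : Int) : List Int → Option Int
  | [] => none
  | j :: js =>
    match PySem.List.pyGet? P j with
    | some v => if v = query then some j else pqFindA P query js
    | none => none

def processQueries (queries : List Int) (m : Int) : List Int :=
  let P : List Int := PySem.List.pyRange 1 (m + 1) 1
  let res : List Int := []
  (queries.foldl (fun (st : List Int × List Int) query =>
      match pqFindA st.1 query (PySem.List.pyRange 0 m 1) with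
      | some j => (query :: st.1.eraseIdx j.toNat, st.2 ++ [j])  -- del P[j]; P.insert(0, query); res.append(j)
      | none => st) (P, res)).2

-- ===== PORT B =====
def processQueries_alt (queries : List Int) (m : Int) : List Int :=
  (queries.foldl (fun (st : List Int × List Int) q =>
      match PySem.List.index? st.1 q with
      | some i => (q :: st.1.eraseIdx i, st.2 ++ [(i : Int)])
      | none =>
        if 1 ≤ q ∧ q ≤ m then
          (q :: st.1, st.2 ++ [q - 1 + (st.1.countP (fun x => decide (q < x)) : Int)])
        else st) ([], [])).2

-- ===== PRECONDITION & SPEC =====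
def Spec_processQueries (queries : List Int) (m : Int) (out : List Int) : Prop := out = processQueries_alt queries m
instance (queries : List Int) (m : Int) (out : List Int) : Decidable (Spec_processQueries queries m out) := by unfold Spec_processQueries; infer_instance

-- ===== CLAIM (what is proved, stated in full; the proofs are below) =====
def Claim_equal_processQueries : Prop := ∀ (queries : List Int) (m : Int), Dom_processQueries queries m → Spec_processQueries queries m (processQueries queries m)

-- ===== LEMMAS AND PROOFS =====

-- the loop bodies of the two ports, named for the proofs (definitionally the inline lambdas)
def pvStepA (m : Int) (st : List Int × List Int) (query : Int) : List Int × List Int :=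
  match pqFindA st.1 query (PySem.List.pyRange 0 m 1) with
  | some j => (query :: st.1.eraseIdx j.toNat, st.2 ++ [j])
  | none => st

def pvStepB (m : Int) (st : List Int × List Int) (q : Int) : List Int × List Int :=
  match PySem.List.index? st.1 q with
  | some i => (q :: st.1.eraseIdx i, st.2 ++ [(i : Int)])
  | none =>
    if 1 ≤ q ∧ q ≤ m then
      (q :: st.1, st.2 ++ [q - 1 + (st.1.countP (fun x => decide (q < x)) : Int)])
    else st

-- the invariant tying A's full permutation P to B's move-to-front list `front`
def pvInv (m : Int) (front P : List Int) : Prop :=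
  P = front ++ (PySem.List.pyRange 1 (m + 1) 1).filter (fun x => !front.contains x) ∧
  front.Nodup ∧ (∀ x ∈ front, 1 ≤ x ∧ x ≤ m)

theorem pvInv_init (m : Int) : pvInv m [] (PySem.List.pyRange 1 (m + 1) 1) :=
  ⟨by simp, List.nodup_nil, by simp⟩

theorem pvIdxOf?_append_left {q : Int} {l1 l2 : List Int} (h : q ∈ l1) :
    List.idxOf? q (l1 ++ l2) = List.idxOf? q l1 := by
  induction l1 with
  | nil => simp at h
  | cons a t ih =>
    by_cases hq : a = q
    · simp [List.idxOf?_cons, hq]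
    · have hqt : q ∈ t := by
        rcases List.mem_cons.mp h with h | h
        · exact absurd h.symm hq
        · exact h
      simp [List.idxOf?_cons, hq, ih hqt]

theorem pvIdxOf?_append_right {q : Int} {l1 l2 : List Int} (h : q ∉ l1) :
    List.idxOf? q (l1 ++ l2) = (List.idxOf? q l2).map (fun i => l1.length + i) := by
  induction l1 with
  | nil => simp
  | cons a t ih =>
    have ha : a ≠ q := fun hc => h (by simp [hc])
    have ht : q ∉ t := fun hc => h (List.mem_cons_of_mem _ hc)
    rw [List.cons_append, List.idxOf?_cons, if_neg (by simpa using ha), ih ht]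
    cases List.idxOf? q l2 <;> simp <;> omega

theorem pvIdxOf?_sorted {l : List Int} {q : Int} (hs : List.Pairwise (· < ·) l) (hm : q ∈ l) :
    List.idxOf? q l = some (l.countP (fun x => decide (x < q))) := by
  induction l with
  | nil => simp at hm
  | cons a t ih =>
    rcases List.pairwise_cons.mp hs with ⟨hlt, ht⟩
    by_cases hq : a = q
    · subst hq
      have h0 : t.countP (fun x => decide (x < a)) = 0 := by
        rw [List.countP_eq_zero]
        intro x hx
        have := hlt x hx
        simp
        omega
      simp [List.idxOf?_cons, h0]
    · have hqt : q ∈ t := by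
        rcases List.mem_cons.mp hm with h | h
        · exact absurd h.symm hq
        · exact h
      have haq : a < q := hlt q hqt
      rw [List.idxOf?_cons, if_neg (by simpa using hq), ih ht hqt]
      simp [haq]

-- counting a predicate over the members of f inside a nodup superlist L
theorem pvCountP_sub (L f : List Int) (p : Int → Bool) (hL : L.Nodup) (hf : f.Nodup)
    (hsub : ∀ x ∈ f, x ∈ L) :
    L.countP (fun x => p x && f.contains x) = f.countP p := by
  rw [List.countP_eq_length_filter, List.countP_eq_length_filter]
  refine List.Perm.length_eq (List.perm_of_nodup_nodup_toFinset_eq (hL.filter _) (hf.filter _) ?_)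
  ext x
  simp only [List.mem_toFinset, List.mem_filter, Bool.and_eq_true, List.contains_iff_mem]
  exact ⟨fun ⟨_, h2, h3⟩ => ⟨h3, h2⟩, fun ⟨h2, h3⟩ => ⟨hsub x h2, h3, h2⟩⟩

theorem pvCountP_split (l : List Int) (c p : Int → Bool) :
    l.countP p = l.countP (fun x => p x && c x) + l.countP (fun x => p x && !c x) := by
  induction l with
  | nil => simp
  | cons a t ih =>
    simp only [List.countP_cons, ih]
    cases hc : c a <;> cases hp : p a <;> simp [hc, hp] <;> omega

theorem pvCountRange_lt (m q : Int) (h1 : 1 ≤ q) (h2 : q ≤ m) :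
    (PySem.List.pyRange 1 (m + 1) 1).countP (fun x => decide (x < q)) = (q - 1).toNat := by
  rw [PySem.List.pyRange_one_append 1 q (m + 1) h1 (by omega), List.countP_append]
  have h3 : (PySem.List.pyRange 1 q 1).countP (fun x => decide (x < q)) =
      (PySem.List.pyRange 1 q 1).length := by
    rw [List.countP_eq_length]
    intro x hx
    have := (PySem.List.mem_pyRange_one).mp hx
    simp
    omega
  have h4 : (PySem.List.pyRange q (m + 1) 1).countP (fun x => decide (x < q)) = 0 := by
    rw [List.countP_eq_zero]
    intro x hx
    have := (PySem.List.mem_pyRange_one).mp hx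
    simp
    omega
  rw [h3, h4, PySem.List.length_pyRange_one]
  omega

theorem pvInv_len {m : Int} {front P : List Int} (h : pvInv m front P) :
    P.length = m.toNat := by
  obtain ⟨hP, hnd, hmem⟩ := h
  have hR := PySem.List.nodup_pyRange_one 1 (m + 1)
  have hsub : ∀ x ∈ front, x ∈ PySem.List.pyRange 1 (m + 1) 1 := fun x hx => by
    rw [PySem.List.mem_pyRange_one]
    have := hmem x hx
    omega
  have hsplit := pvCountP_split (PySem.List.pyRange 1 (m + 1) 1)
    (fun x => front.contains x) (fun _ => true)
  have hcf := pvCountP_sub (PySem.List.pyRange 1 (m + 1) 1) front (fun _ => true) hR hnd hsub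
  simp only [Bool.true_and] at hsplit hcf
  have h1 : (PySem.List.pyRange 1 (m + 1) 1).countP (fun _ => true) =
      (PySem.List.pyRange 1 (m + 1) 1).length := by simp
  have h2 : front.countP (fun _ => true) = front.length := by simp
  have h3 : ((PySem.List.pyRange 1 (m + 1) 1).filter (fun x => !front.contains x)).length =
      (PySem.List.pyRange 1 (m + 1) 1).countP (fun x => !front.contains x) := by
    rw [List.countP_eq_length_filter]
  have hlenR : (PySem.List.pyRange 1 (m + 1) 1).length = m.toNat := by
    rw [PySem.List.length_pyRange_one]
    omega
  rw [hP, List.length_append]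
  omega

theorem pvEraseIdx_append {α : Type} (l1 l2 : List α) (k : Nat) :
    (l1 ++ l2).eraseIdx (l1.length + k) = l1 ++ l2.eraseIdx k := by
  induction l1 with
  | nil => simp
  | cons a t ih => simpa [Nat.succ_add] using ih

theorem pqFindA_spec (P : List Int) (q : Int) :
    ∀ (n k : Nat), P.length - k = n → k ≤ P.length →
      pqFindA P q (PySem.List.pyRange (k : Int) (P.length : Int) 1) =
        (List.idxOf? q (P.drop k)).map (fun i => ((k + i : Nat) : Int)) := by
  intro n
  induction n with
  | zero =>
    intro k hn hk
    have hk' : k = P.length := by omega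
    subst hk'
    rw [PySem.List.pyRange_one_eq_nil (by omega)]
    simp [pqFindA]
  | succ n ih =>
    intro k hn hk
    have hk2 : k < P.length := by omega
    have hpg : PySem.List.pyGet? P (k : Int) = some P[k] := by
      rw [PySem.List.pyGet?_natCast, List.getElem?_eq_getElem hk2]
    rw [PySem.List.pyRange_one_cons (by exact_mod_cast hk2)]
    simp only [pqFindA]
    rw [hpg, List.drop_eq_getElem_cons hk2, List.idxOf?_cons]
    by_cases hv : P[k] = q
    · simp [hv]
    · have hcast : ((k : Int) + 1) = ((k + 1 : Nat) : Int) := by push_cast; ring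
      have hih := ih (k + 1) (by omega) (by omega)
      simp only [hv, if_false, beq_iff_eq]
      rw [hcast, hih]
      cases List.idxOf? q (P.drop (k + 1)) <;> simp <;> omega

theorem pqFindA_eq {m q : Int} {front P : List Int} (h : pvInv m front P) :
    pqFindA P q (PySem.List.pyRange 0 m 1) = (List.idxOf? q P).map (fun (i : Nat) => (i : Int)) := by
  have hlen := pvInv_len h
  have hrange : PySem.List.pyRange 0 m 1 =
      PySem.List.pyRange ((0 : Nat) : Int) ((P.length : Nat) : Int) 1 := by
    rcases le_or_gt 0 m with hm | hm
    · have hPm : ((P.length : Nat) : Int) = m := by omega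
      rw [hPm]
      norm_num
    · have h0 : P.length = 0 := by omega
      rw [h0, PySem.List.pyRange_one_eq_nil (by omega), PySem.List.pyRange_one_eq_nil (by norm_num)]
  rw [hrange, pqFindA_spec P q P.length 0 (by omega) (by omega)]
  simp only [List.drop_zero]
  cases List.idxOf? q P <;> simp

-- one query: the two loop bodies stay in lock-step and preserve the invariant
theorem pvStep_eq (m q : Int) (front P res : List Int) (h : pvInv m front P) :
    ∃ front' P',
      pvStepA m (P, res) q = (P', (pvStepB m (front, res) q).2) ∧
      (pvStepB m (front, res) q).1 = front' ∧ pvInv m front' P' := by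
  obtain ⟨hP, hnd, hmem⟩ := h
  have hfind := pqFindA_eq (q := q) ⟨hP, hnd, hmem⟩
  by_cases hqf : q ∈ front
  · -- q already fronted: both sides find it at the same index inside `front`
    obtain ⟨i, hi⟩ := Option.isSome_iff_exists.mp ((PySem.List.index?_isSome_iff front q).mpr hqf)
    have hidx : List.idxOf? q front = some i := by
      rw [← PySem.List.index?_eq_idxOf?]
      exact hi
    obtain ⟨hilt, -, -⟩ := PySem.List.getElem_of_index?_eq_some hi
    have hidxP : List.idxOf? q P = some i := by
      rw [hP, pvIdxOf?_append_left hqf, hidx]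
    have herase : front.eraseIdx i = front.erase q := by
      rw [List.erase_eq_eraseIdx, hidx]
    have hmemerase : ∀ x, x ∈ q :: front.erase q ↔ x ∈ front := by
      intro x
      by_cases hx : x = q
      · subst hx
        simp [hqf]
      · rw [List.mem_cons]
        simp [hx, List.mem_erase_of_ne hx]
    have hfilter : (PySem.List.pyRange 1 (m + 1) 1).filter
          (fun x => !(q :: front.erase q).contains x) =
        (PySem.List.pyRange 1 (m + 1) 1).filter (fun x => !front.contains x) := by
      apply List.filter_congr
      intro x _
      have hb : (q :: front.erase q).contains x = front.contains x := by
        rw [Bool.eq_iff_iff]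
        simpa [List.contains_iff_mem] using hmemerase x
      rw [hb]
    have hA : pvStepA m (P, res) q = (q :: P.eraseIdx i, res ++ [(i : Int)]) := by
      unfold pvStepA
      dsimp only
      rw [hfind, hidxP]
      simp
    have hB : pvStepB m (front, res) q = (q :: front.eraseIdx i, res ++ [(i : Int)]) := by
      unfold pvStepB
      dsimp only
      rw [hi]
    refine ⟨q :: front.erase q,
      q :: (front.erase q ++ (PySem.List.pyRange 1 (m + 1) 1).filter (fun x => !front.contains x)),
      ?_, ?_, ?_, ?_, ?_⟩
    · rw [hA, hB]
      rw [hP, List.eraseIdx_append_of_lt_length hilt, herase]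
    · rw [hB, herase]
    · rw [hfilter]
      simp
    · exact List.nodup_cons.mpr ⟨hnd.not_mem_erase, hnd.erase q⟩
    · intro x hx
      exact hmem x ((hmemerase x).mp hx)
  · by_cases hqm : 1 ≤ q ∧ q ≤ m
    · -- q is fresh: A finds it inside the filtered range, B computes the index in closed form
      have hR := PySem.List.nodup_pyRange_one 1 (m + 1)
      have hsub : ∀ x ∈ front, x ∈ PySem.List.pyRange 1 (m + 1) 1 := fun x hx => by
        rw [PySem.List.mem_pyRange_one]
        have := hmem x hx
        omega
      have hqr : q ∈ PySem.List.pyRange 1 (m + 1) 1 :=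
        (PySem.List.mem_pyRange_one).mpr ⟨hqm.1, by omega⟩
      have hqtail : q ∈ (PySem.List.pyRange 1 (m + 1) 1).filter (fun x => !front.contains x) :=
        List.mem_filter.mpr ⟨hqr, by simp [hqf]⟩
      have htailnd := hR.filter (fun x => !front.contains x)
      have htailsorted := (PySem.List.pairwise_lt_pyRange_one 1 (m + 1)).filter
        (fun x => !front.contains x)
      have htidx := pvIdxOf?_sorted htailsorted hqtail
      have hidxP : List.idxOf? q P = some (front.length +
          ((PySem.List.pyRange 1 (m + 1) 1).filter (fun x => !front.contains x)).countP
            (fun x => decide (x < q))) := by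
        rw [hP, pvIdxOf?_append_right hqf, htidx]
        rfl
      -- counting: index arithmetic
      have hsplit := pvCountP_split (PySem.List.pyRange 1 (m + 1) 1)
        (fun x => front.contains x) (fun x => decide (x < q))
      have hcf : (PySem.List.pyRange 1 (m + 1) 1).countP
            (fun x => decide (x < q) && front.contains x) =
          front.countP (fun x => decide (x < q)) :=
        pvCountP_sub (PySem.List.pyRange 1 (m + 1) 1) front
          (fun x => decide (x < q)) hR hnd hsub
      have htc : ((PySem.List.pyRange 1 (m + 1) 1).filter (fun x => !front.contains x)).countP
          (fun x => decide (x < q)) =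
          (PySem.List.pyRange 1 (m + 1) 1).countP
            (fun x => decide (x < q) && !front.contains x) := by
        rw [List.countP_filter]
      have hrc := pvCountRange_lt m q hqm.1 hqm.2
      have hflen := pvCountP_split front (fun x => decide (x < q)) (fun _ => true)
      simp only [Bool.true_and] at hflen
      have hflen2 : front.countP (fun _ => true) = front.length := by simp
      have hgt : front.countP (fun x => !decide (x < q)) =
          front.countP (fun x => decide (q < x)) := by
        apply List.countP_congr
        intro x hx
        have hxq : x ≠ q := fun hc => hqf (hc ▸ hx)
        simp
        omega
      have hval : ((front.length +
          ((PySem.List.pyRange 1 (m + 1) 1).filter (fun x => !front.contains x)).countP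
            (fun x => decide (x < q)) : Nat) : Int) =
          q - 1 + (front.countP (fun x => decide (q < x)) : Int) := by
        omega
      have hA : pvStepA m (P, res) q = (q :: P.eraseIdx (front.length +
          ((PySem.List.pyRange 1 (m + 1) 1).filter (fun x => !front.contains x)).countP
            (fun x => decide (x < q))),
          res ++ [((front.length +
          ((PySem.List.pyRange 1 (m + 1) 1).filter (fun x => !front.contains x)).countP
            (fun x => decide (x < q)) : Nat) : Int)]) := by
        unfold pvStepA
        dsimp only
        rw [hfind, hidxP]
        simp
        congr 1
      have hB : pvStepB m (front, res) q = (q :: front,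
          res ++ [q - 1 + (front.countP (fun x => decide (q < x)) : Int)]) := by
        unfold pvStepB
        dsimp only
        rw [PySem.List.index?_eq_idxOf?, List.idxOf?_eq_none_iff.mpr hqf, if_pos hqm]
      have herase : ((PySem.List.pyRange 1 (m + 1) 1).filter (fun x => !front.contains x)).eraseIdx
          (((PySem.List.pyRange 1 (m + 1) 1).filter (fun x => !front.contains x)).countP
            (fun x => decide (x < q))) =
          ((PySem.List.pyRange 1 (m + 1) 1).filter (fun x => !front.contains x)).erase q := by
        rw [List.erase_eq_eraseIdx, htidx]
      have hfilter2 : ((PySem.List.pyRange 1 (m + 1) 1).filter (fun x => !front.contains x)).erase q =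
          (PySem.List.pyRange 1 (m + 1) 1).filter (fun x => !(q :: front).contains x) := by
        rw [List.Nodup.erase_eq_filter htailnd q, List.filter_filter]
        apply List.filter_congr
        intro x _
        by_cases hx : x = q
        · subst hx
          simp
        · simp [hx]
      refine ⟨q :: front,
        q :: (front ++ (PySem.List.pyRange 1 (m + 1) 1).filter (fun x => !(q :: front).contains x)),
        ?_, ?_, ?_, ?_, ?_⟩
      · rw [hA, hB, hval]
        rw [hP, pvEraseIdx_append, herase, hfilter2]
      · rw [hB]
      · simp
      · exact List.nodup_cons.mpr ⟨hqf, hnd⟩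
      · intro x hx
        rcases List.mem_cons.mp hx with hx | hx
        · subst hx
          exact hqm
        · exact hmem x hx
    · -- q not in P at all: both sides leave the state unchanged
      have hqP : q ∉ P := by
        rw [hP]
        intro hc
        rcases List.mem_append.mp hc with hc | hc
        · exact hqf hc
        · have := (PySem.List.mem_pyRange_one).mp (List.mem_of_mem_filter hc)
          omega
      have hA : pvStepA m (P, res) q = (P, res) := by
        unfold pvStepA
        dsimp only
        rw [hfind, List.idxOf?_eq_none_iff.mpr hqP]
        rfl
      have hB : pvStepB m (front, res) q = (front, res) := by
        unfold pvStepB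
        dsimp only
        rw [PySem.List.index?_eq_idxOf?, List.idxOf?_eq_none_iff.mpr hqf]
        simp [hqm]
      exact ⟨front, P, by rw [hA, hB], by rw [hB], hP, hnd, hmem⟩

theorem pvLoop (m : Int) (queries : List Int) :
    ∀ front P res, pvInv m front P →
      (queries.foldl (pvStepA m) (P, res)).2 = (queries.foldl (pvStepB m) (front, res)).2 := by
  induction queries with
  | nil =>
    intro front P res _
    rfl
  | cons q qs ih =>
    intro front P res h
    obtain ⟨front', P', hA, hB, hInv⟩ := pvStep_eq m q front P res h
    rw [List.foldl_cons, List.foldl_cons, hA]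
    have hBpair : pvStepB m (front, res) q = (front', (pvStepB m (front, res) q).2) := by
      rw [← hB]
    rw [hBpair]
    exact ih front' P' _ hInv

-- ===== VERDICT (by name: the statement is the Claim_ definition above) =====
theorem processQueries_spec : Claim_equal_processQueries := by
  intro queries m _
  show processQueries queries m = processQueries_alt queries m
  show (queries.foldl (pvStepA m) (PySem.List.pyRange 1 (m + 1) 1, [])).2 =
    (queries.foldl (pvStepB m) ([], [])).2
  exact pvLoop m queries [] _ [] (pvInv_init m)
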